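-- pv_equiv track=rewrite | github.com/DeYan009/PythonLabs | Lab4/Lab4.py | count_string_repetitions
-- ===== SOURCE A (Python) =====
-- def count_string_repetitions(lst):
--     counts = {}
--     for string in lst:
--         if string in counts:
--             counts[string] += 1
--         else:
--             counts[string] = 1
--     return list(counts.values())
-- ===== SOURCE B (Python) =====
-- def count_string_repetitions(lst):
--     distinct = []
--     for s in lst:
--         if s not in distinct:
--             distinct.append(s)
--     return [lst.count(s) for s in distinct]
-- ===== Notes on version B (the rewrite author's own statement) =====
-- stated objective: alternative
-- what changed: Replaces the single-pass dict accumulation by collecting the distinct strings in first-seen order and tallying each with a full-list count scan.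
import Mathlib
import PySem

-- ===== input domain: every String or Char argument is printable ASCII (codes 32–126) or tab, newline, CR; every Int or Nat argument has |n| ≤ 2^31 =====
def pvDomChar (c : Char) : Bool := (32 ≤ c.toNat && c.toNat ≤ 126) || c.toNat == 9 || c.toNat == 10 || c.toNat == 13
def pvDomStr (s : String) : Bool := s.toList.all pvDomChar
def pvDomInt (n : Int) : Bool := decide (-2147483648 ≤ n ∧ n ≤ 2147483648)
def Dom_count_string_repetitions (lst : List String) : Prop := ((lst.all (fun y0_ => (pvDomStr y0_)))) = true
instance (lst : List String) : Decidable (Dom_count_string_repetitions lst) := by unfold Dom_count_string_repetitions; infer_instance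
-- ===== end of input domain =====

-- ===== PORT A =====
-- B collects the distinct strings in first-seen order and tallies each with lst.count; return value only.
def count_string_repetitions (lst : List String) : List Int :=
  (lst.foldl (fun counts s =>
      if counts.contains s then counts.insert s (counts.getD s 0 + 1)
      else counts.insert s 1) PySem.Dict.empty).values

-- ===== PORT B =====
def count_string_repetitions_alt (lst : List String) : List Int :=
  let distinct := lst.foldl (fun acc s => if s ∈ acc then acc else acc ++ [s]) ([] : List String)
  distinct.map (fun s => (lst.count s : Int))

-- ===== PRECONDITION & SPEC =====
def Spec_count_string_repetitions (lst : List String) (out : List Int) : Prop := out = count_string_repetitions_alt lst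
instance (lst : List String) (out : List Int) : Decidable (Spec_count_string_repetitions lst out) := by unfold Spec_count_string_repetitions; infer_instance

-- ===== CLAIM (what is proved, stated in full; the proofs are below) =====
def Claim_equal_count_string_repetitions : Prop := ∀ (lst : List String), Dom_count_string_repetitions lst → Spec_count_string_repetitions lst (count_string_repetitions lst)

-- ===== LEMMAS AND PROOFS =====

-- ===== VERDICT (by name: the statement is the Claim_ definition above) =====
theorem count_string_repetitions_spec : Claim_equal_count_string_repetitions := by
  intro lst _
  unfold Spec_count_string_repetitions count_string_repetitions count_string_repetitions_alt
  have h1 : lst.foldl (fun (counts : PySem.Dict String Int) s =>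
        if counts.contains s then counts.insert s (counts.getD s 0 + 1)
        else counts.insert s 1) PySem.Dict.empty
      = lst.foldl (fun (d : PySem.Dict String Int) s => d.insert s (d.getD s 0 + 1)) PySem.Dict.empty := by
    apply PySem.List.foldl_congr_mem
    intro d s _
    by_cases h : d.contains s
    · simp [h]
    · simp [h, PySem.Dict.getD_of_not_contains]
  have h2 : lst.foldl (fun (acc : List String) s => if s ∈ acc then acc else acc ++ [s]) []
      = lst.foldl PySem.Set.add [] := by
    apply PySem.List.foldl_congr_mem
    intro acc s _
    rw [PySem.Set.add_eq_ite]
  rw [h1, PySem.Dict.foldl_insert_getD_add_one_eq_counter, h2, ← PySem.Set.ofList_eq_foldl]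
  simp [PySem.Dict.values, PySem.Dict.items_counter]
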